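-- pv_equiv track=rewrite | github.com/pablopertusa/uni_y_proyectos | eda/tema2_4.b.py | secuencia_es_BST
-- ===== SOURCE A (Python) =====
-- def secuencia_es_BST(lista):
--     if len(lista) > 1:
--         if lista[1] >= lista[0]:
--             if all([x>=lista[0] for x in lista]):
--                 return secuencia_es_BST(lista[1:])
--             else:
--                 return False
--         else:
--             if all([x<=lista[0] for x in lista]):
--                 return secuencia_es_BST(lista[1:])
--             else:
--                 return False
--     else:
--         return True
-- ===== SOURCE B (Python) =====
-- def secuencia_es_BST(lista):
--     # One pass: keep running bounds [low, high] implied by earlier pivots.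
--     low = None
--     high = None
--     for i in range(len(lista) - 1):
--         cur = lista[i]
--         nxt = lista[i + 1]
--         if (low is not None and cur < low) or (high is not None and cur > high):
--             return False
--         if nxt >= cur:
--             low = cur if low is None else max(low, cur)
--         else:
--             high = cur if high is None else min(high, cur)
--     if lista:
--         x = lista[-1]
--         if (low is not None and x < low) or (high is not None and x > high):
--             return False
--     return True
-- ===== Notes on version B (the rewrite author's own statement) =====
-- stated objective: faster
-- what changed: Replaced the recursion that re-scans the whole suffix (and re-slices it) at every step by a single left-to-right pass maintaining running [low, high] bounds accumulated from the direction of each consecutive pair.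
import Mathlib
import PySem

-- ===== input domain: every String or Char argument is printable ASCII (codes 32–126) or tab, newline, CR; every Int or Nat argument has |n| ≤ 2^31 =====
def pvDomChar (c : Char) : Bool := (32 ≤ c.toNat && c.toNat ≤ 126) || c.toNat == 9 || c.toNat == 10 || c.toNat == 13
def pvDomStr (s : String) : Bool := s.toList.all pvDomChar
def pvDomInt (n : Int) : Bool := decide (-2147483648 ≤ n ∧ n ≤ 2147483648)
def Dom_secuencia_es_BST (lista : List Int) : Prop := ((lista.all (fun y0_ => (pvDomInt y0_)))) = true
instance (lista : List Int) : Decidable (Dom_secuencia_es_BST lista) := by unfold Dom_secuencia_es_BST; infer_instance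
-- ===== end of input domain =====

-- B replaces A's quadratic suffix-rescanning recursion by one linear pass with running [low, high] bounds (measured faster, asymptotic O(n) vs O(n^2)).

-- ===== PORT A =====
def secuencia_es_BST (lista : List Int) : Bool :=
  match lista with
  | a :: b :: rest =>            -- len(lista) > 1
    if b ≥ a then                -- lista[1] >= lista[0]
      if (a :: b :: rest).all (fun x => decide (x ≥ a)) then
        secuencia_es_BST (b :: rest)   -- lista[1:]
      else false
    else
      if (a :: b :: rest).all (fun x => decide (x ≤ a)) then
        secuencia_es_BST (b :: rest)
      else false
  | _ => true

-- ===== PORT B =====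
-- cur violates the accumulated bounds? (the 'return False' test of Source B)
def pvBad (x : Int) (low high : Option Int) : Bool :=
  (match low with | none => false | some l => decide (x < l)) ||
  (match high with | none => false | some h => decide (x > h))

-- the loop of Source B over consecutive pairs, plus the final-element check
def pvLoop : List Int → Option Int → Option Int → Bool
  | [], _, _ => true
  | [x], low, high => !(pvBad x low high)
  | cur :: nxt :: rest, low, high =>
    if pvBad cur low high then false
    else if nxt ≥ cur then
      pvLoop (nxt :: rest) (some (match low with | none => cur | some l => max l cur)) high
    else
      pvLoop (nxt :: rest) low (some (match high with | none => cur | some h => min h cur))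

def secuencia_es_BST_alt (lista : List Int) : Bool := pvLoop lista none none

-- ===== PRECONDITION & SPEC =====
def Spec_secuencia_es_BST (lista : List Int) (out : Bool) : Prop := out = secuencia_es_BST_alt lista
instance (lista : List Int) (out : Bool) : Decidable (Spec_secuencia_es_BST lista out) := by unfold Spec_secuencia_es_BST; infer_instance

-- ===== CLAIM (what is proved, stated in full; the proofs are below) =====
def Claim_equal_secuencia_es_BST : Prop := ∀ (lista : List Int), Dom_secuencia_es_BST lista → Spec_secuencia_es_BST lista (secuencia_es_BST lista)

-- ===== LEMMAS AND PROOFS =====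

-- strengthening the low bound splits the 'ok' test into the old test and 'cur ≤ x'
lemma bad_updLow (x c : Int) (low high : Option Int) :
    pvBad x (some (match low with | none => c | some l => max l c)) high
      = (pvBad x low high || decide (x < c)) := by
  cases low <;> cases high <;> (rw [Bool.eq_iff_iff]; simp [pvBad] <;> omega)

lemma bad_updHigh (x c : Int) (low high : Option Int) :
    pvBad x low (some (match high with | none => c | some h => min h c))
      = (pvBad x low high || decide (c < x)) := by
  cases low <;> cases high <;> (rw [Bool.eq_iff_iff]; simp [pvBad] <;> omega)

-- the main invariant: the loop equals "every element passes the incoming bounds" && A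
lemma loop_eq : ∀ (l : List Int) (low high : Option Int),
    pvLoop l low high = ((l.all fun x => !(pvBad x low high)) && secuencia_es_BST l) := by
  intro l
  induction l with
  | nil => intro low high; simp [pvLoop, secuencia_es_BST]
  | cons a t ih =>
    intro low high
    cases t with
    | nil => simp [pvLoop, secuencia_es_BST]
    | cons b rest =>
      by_cases hbad : pvBad a low high = true
      · simp [pvLoop, hbad]
      · simp only [Bool.not_eq_true] at hbad
        by_cases hd : b ≥ a
        · simp only [pvLoop, hbad, Bool.false_eq_true, ite_false, hd, ite_true, ih,
            secuencia_es_BST]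
          simp only [bad_updLow]
          cases hA : secuencia_es_BST (b :: rest) <;>
            (rw [Bool.eq_iff_iff];
             simp [hbad, hd, List.all_eq_true, forall_and] <;> tauto)
        · simp only [pvLoop, hbad, Bool.false_eq_true, ite_false, hd, ih,
            secuencia_es_BST]
          simp only [bad_updHigh]
          cases hA : secuencia_es_BST (b :: rest) <;>
            (rw [Bool.eq_iff_iff];
             simp [hbad, List.all_eq_true, forall_and] <;> tauto)

-- ===== VERDICT (by name: the statement is the Claim_ definition above) =====
theorem secuencia_es_BST_spec : Claim_equal_secuencia_es_BST := by
  intro lista _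
  unfold Spec_secuencia_es_BST secuencia_es_BST_alt
  rw [loop_eq]
  simp [pvBad]
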